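-- pv_equiv track=rewrite | github.com/taozhan18/MooseAgent | src/mooseagent/utils.py | extract_files_and_descriptions
-- ===== SOURCE A (Python) =====
-- def extract_files_and_descriptions(text):
--     """
--     从指定格式的文本中提取文件名和描述内容。
--
--     参数:
--         text (str): 输入的文本，格式为：
--                     <n> files are needed to complete the simulation task.
--                     **file_name1:**
--                     **Description:** detailed description of the file.
--
--     返回:
--         dict: 包含文件名和描述的字典。
--     """
--     result_dict = {}  # 初始化结果字典
--     lines = text.strip().split("\n")  # 按行分割文本
--     current_file_name = None  # 当前正在处理的文件名
--     current_description = []  # 当前文件的描述内容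
--
--     for line in lines:
--         line = line.strip()  # 去除行首尾的空白字符
--         line = line.replace("#", "").replace("*", "")
--         if line.startswith("file_name:"):
--             # 如果当前有正在处理的文件名，保存之前的描述
--             if current_file_name:
--                 result_dict[current_file_name] = "\n".join(current_description).strip()
--
--             # 重置当前文件名和描述
--             current_file_name = line.split(":", 1)[1].strip()
--             current_description = []
--         elif line.startswith("Description:"):
--             # 开始提取描述内容
--             current_description.append(line.split(":", 1)[1].strip())
--         elif current_file_name:
--             # 如果当前行属于描述的一部分，继续添加到描述中
--             current_description.append(line)
--
--     # 保存最后一个文件的描述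
--     if current_file_name:
--         result_dict[current_file_name] = "\n".join(current_description).strip()
--
--     return result_dict
-- ===== SOURCE B (Python) =====
-- def extract_files_and_descriptions(text):
--     """Two-phase rewrite: clean the lines, partition them into blocks at
--     'file_name:' headers, then build each entry from its block."""
--     cleaned = [ln.strip().replace("#", "").replace("*", "") for ln in text.strip().split("\n")]
--     result = {}
--     n = len(cleaned)
--     i = 0
--     # lines before the first header are discarded
--     while i < n and not cleaned[i].startswith("file_name:"):
--         i += 1
--     while i < n:
--         j = i + 1
--         while j < n and not cleaned[j].startswith("file_name:"):
--             j += 1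
--         name = cleaned[i].split(":", 1)[1].strip()
--         if name:  # a block with an empty name is dropped entirely
--             body = [l.split(":", 1)[1].strip() if l.startswith("Description:") else l
--                     for l in cleaned[i + 1 : j]]
--             result[name] = "\n".join(body).strip()
--         i = j
--     return result
-- ===== Notes on version B (the rewrite author's own statement) =====
-- stated objective: alternative
-- what changed: A's single stateful pass with flush-on-next-header and a current-name/description accumulator is replaced by a two-phase decomposition: clean all lines, partition them into blocks at 'file_name:' headers (dropping the pre-header prefix and empty-name blocks), then build each dict entry directly from its block.
import Mathlib
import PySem

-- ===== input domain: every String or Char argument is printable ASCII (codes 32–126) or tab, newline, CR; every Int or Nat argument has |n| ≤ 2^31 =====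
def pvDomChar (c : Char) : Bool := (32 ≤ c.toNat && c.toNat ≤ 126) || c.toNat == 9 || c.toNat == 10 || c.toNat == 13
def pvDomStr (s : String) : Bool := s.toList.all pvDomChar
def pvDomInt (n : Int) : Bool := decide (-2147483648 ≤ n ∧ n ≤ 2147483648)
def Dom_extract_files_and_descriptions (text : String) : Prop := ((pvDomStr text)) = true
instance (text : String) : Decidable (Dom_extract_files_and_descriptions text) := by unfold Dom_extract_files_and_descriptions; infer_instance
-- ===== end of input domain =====

-- B is a two-phase rewrite (clean lines, partition into blocks at 'file_name:' headers, build each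
-- entry from its block) of A's single stateful flush-on-next-header pass; same return value, similar cost.

-- ===== PORT A =====
-- shared line-level primitives (both Python versions contain these exact expressions)
-- line.strip().replace("#", "").replace("*", "")
def pvClean (l : String) : String :=
  PySem.Str.replace (PySem.Str.replace (PySem.Str.strip l) "#" "") "*" ""
-- text.strip().split("\n")
def pvLines (text : String) : List String :=
  (PySem.Str.split? (PySem.Str.strip text) "\n").getD []   -- sep "\n" ≠ "", so never none
-- line.split(":", 1)[1].strip()  (only applied to lines containing ':', where [1] exists)
def pvAfter (l : String) : String :=
  PySem.Str.strip (((PySem.Str.splitMax? l ":" 1).getD []).getD 1 "")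
def pvIsHeader (l : String) : Bool := PySem.Str.startswith l "file_name:"
def pvIsDesc (l : String) : Bool := PySem.Str.startswith l "Description:"
-- "\n".join(ds).strip()
def pvJoinStrip (ds : List String) : String := PySem.Str.strip (PySem.Str.join "\n" ds)
-- Python truthiness of current_file_name (None or "" are falsy)
def pvTruthy : Option String → Bool
  | none => false
  | some s => s != ""
-- 'if current_file_name: result_dict[current_file_name] = "\n".join(desc).strip()'
def pvFlush (d : PySem.Dict String String) (cur : Option String) (ds : List String) :
    PySem.Dict String String :=
  match cur with
  | none => d
  | some s => if s != "" then d.insert s (pvJoinStrip ds) else d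

-- A's for-loop, state = (result_dict, current_file_name, current_description); final flush at []
def pvLoopA : List String → PySem.Dict String String → Option String → List String →
    PySem.Dict String String
  | [], d, cur, ds => pvFlush d cur ds
  | l :: ls, d, cur, ds =>
    let c := pvClean l
    if pvIsHeader c then
      pvLoopA ls (pvFlush d cur ds) (some (pvAfter c)) []
    else if pvIsDesc c then
      pvLoopA ls d cur (ds ++ [pvAfter c])
    else if pvTruthy cur then
      pvLoopA ls d cur (ds ++ [c])
    else
      pvLoopA ls d cur ds

def extract_files_and_descriptions (text : String) : List (String × String) :=
  (pvLoopA (pvLines text) PySem.Dict.empty none []).items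

-- ===== PORT B =====
-- body line: l.split(":",1)[1].strip() if l.startswith("Description:") else l
def pvBodyLine (l : String) : String := if pvIsDesc l then pvAfter l else l

-- B's second phase: ls is the cleaned list starting at the first header (or empty);
-- scanning forward to the next header and slicing = takeWhile / dropWhile on (not header)
def pvRunB : List String → PySem.Dict String String → PySem.Dict String String
  | [], d => d
  | hd :: rest, d =>
    let body := rest.takeWhile (fun l => !pvIsHeader l)
    let name := pvAfter hd
    let d' := if name != "" then d.insert name (pvJoinStrip (body.map pvBodyLine)) else d
    pvRunB (rest.dropWhile (fun l => !pvIsHeader l)) d'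
termination_by ls _ => ls.length
decreasing_by
  have := List.length_dropWhile_le (fun l => !pvIsHeader l) rest
  simp; omega

def extract_files_and_descriptions_alt (text : String) : List (String × String) :=
  let cleaned := (pvLines text).map pvClean
  (pvRunB (cleaned.dropWhile (fun l => !pvIsHeader l)) PySem.Dict.empty).items

-- ===== PRECONDITION & SPEC =====
def Spec_extract_files_and_descriptions (text : String) (out : List (String × String)) : Prop := out = extract_files_and_descriptions_alt text
instance (text : String) (out : List (String × String)) : Decidable (Spec_extract_files_and_descriptions text out) := by unfold Spec_extract_files_and_descriptions; infer_instance

-- ===== CLAIM (what is proved, stated in full; the proofs are below) =====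
def Claim_equal_extract_files_and_descriptions : Prop := ∀ (text : String), Dom_extract_files_and_descriptions text → Spec_extract_files_and_descriptions text (extract_files_and_descriptions text)

-- ===== LEMMAS AND PROOFS =====

-- what A appends to current_description over a header-free segment, given the current name
def pvExt (cur : Option String) : List String → List String
  | [] => []
  | l :: ls =>
    (if pvIsDesc l then [pvAfter l] else if pvTruthy cur then [l] else []) ++ pvExt cur ls

theorem pvExt_truthy (cur : Option String) (h : pvTruthy cur = true) (seg : List String) :
    pvExt cur seg = seg.map pvBodyLine := by
  induction seg with
  | nil => rfl
  | cons l ls ih =>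
    simp only [pvExt, pvBodyLine, h, List.map_cons, ih]
    split <;> simp

theorem pvLoopA_eq (ls : List String) (d : PySem.Dict String String) (cur : Option String)
    (ds : List String) :
    pvLoopA ls d cur ds =
      pvRunB ((ls.map pvClean).dropWhile (fun l => !pvIsHeader l))
        (pvFlush d cur (ds ++ pvExt cur ((ls.map pvClean).takeWhile (fun l => !pvIsHeader l)))) := by
  induction ls generalizing d cur ds with
  | nil => simp [pvLoopA, pvRunB, pvExt]
  | cons l ls ih =>
    by_cases hh : pvIsHeader (pvClean l) = true
    · -- header line: A flushes and resets; B starts a new block here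
      simp only [pvLoopA, if_pos, List.map_cons, List.dropWhile_cons, List.takeWhile_cons,
        Bool.not_eq_eq_eq_not, Bool.not_true, hh]
      rw [ih]
      simp only [Bool.false_eq_true, if_false, pvRunB, List.append_nil]
      by_cases hn : pvAfter (pvClean l) != ""
      · have ht : pvTruthy (some (pvAfter (pvClean l))) = true := by simp [pvTruthy, hn]
        simp only [pvFlush, hn, if_pos, List.nil_append, pvExt_truthy _ ht]
        simp [pvExt]
      · simp [pvFlush, hn, pvExt]
    · -- non-header line: extends the running description (or is dropped)
      simp only [pvLoopA, hh, List.map_cons, List.dropWhile_cons, List.takeWhile_cons,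
        Bool.not_eq_eq_eq_not, Bool.not_true]
      by_cases hd : pvIsDesc (pvClean l) = true
      · simp only [hd, if_pos, ih]
        simp [pvExt, hd]
      · by_cases ht : pvTruthy cur = true
        · simp only [hd, Bool.false_eq_true, if_false, ht, if_pos, ih]
          simp [pvExt, hd, ht]
        · simp only [hd, Bool.false_eq_true, if_false, ht, ih]
          simp [pvExt, hd, ht]

-- ===== VERDICT (by name: the statement is the Claim_ definition above) =====
theorem extract_files_and_descriptions_spec : Claim_equal_extract_files_and_descriptions := by
  intro text _
  show _ = _
  unfold extract_files_and_descriptions extract_files_and_descriptions_alt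
  rw [pvLoopA_eq]
  rfl
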